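-- pv_equiv track=rewrite | github.com/huytq000605/CF-CP | Codeforces Global Round 20/B.py | solve
-- ===== SOURCE A (Python) =====
-- def solve(s):
--     if s[-1] != "B":
--         return "NO"
--     A = 0
--     B = 0
--     for l in s:
--         if l == "A":
--             A += 1
--         else:
--             B += 1
--             if B > A:
--                 return "NO"
--     return "YES"
-- ===== SOURCE B (Python) =====
-- def solve(s):
--     if s[-1] != "B":
--         return "NO"
--     # Cancellation algorithm: normalize every non-'A' to 'B', then repeatedly
--     # delete "AB" pairs; the string is valid iff the irreducible remainder
--     # contains no 'B' (i.e. every 'B' found a matching earlier 'A').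
--     t = "".join("A" if c == "A" else "B" for c in s)
--     while "AB" in t:
--         t = t.replace("AB", "")
--     return "NO" if "B" in t else "YES"
-- ===== Notes on version B (the rewrite author's own statement) =====
-- stated objective: alternative
-- what changed: B replaces A's single-pass two-counter scan with a cancellation algorithm: normalize every non-'A' char to 'B', repeatedly delete "AB" substrings via str.replace until none remain, and answer YES iff the irreducible remainder contains no 'B'.
import Mathlib
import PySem

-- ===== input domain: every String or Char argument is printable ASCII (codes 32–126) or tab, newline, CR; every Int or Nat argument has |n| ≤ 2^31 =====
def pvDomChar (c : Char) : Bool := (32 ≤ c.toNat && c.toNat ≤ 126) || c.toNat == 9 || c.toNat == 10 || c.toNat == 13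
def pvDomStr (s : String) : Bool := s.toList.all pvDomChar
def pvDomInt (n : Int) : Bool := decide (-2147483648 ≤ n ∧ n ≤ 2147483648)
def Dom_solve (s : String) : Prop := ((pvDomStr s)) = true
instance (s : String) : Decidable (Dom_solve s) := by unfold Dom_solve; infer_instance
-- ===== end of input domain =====

-- B replaces A's two-counter early-exit scan by repeated cancellation of "AB" pairs; return values only (neither mutates).

-- ===== PORT A =====
-- A's loop: counters A and B, early "NO" when B > A.
def solveLoop (chars : List Char) (A B : Int) : String :=
  match chars with
  | [] => "YES"
  | l :: rest =>
      if l = 'A' then solveLoop rest (A + 1) B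
      else
        if B + 1 > A then "NO" else solveLoop rest A (B + 1)

def solve (s : String) : String :=
  match PySem.Str.pyGet? s (-1) with
  | none => "NO"   -- s[-1] raises IndexError in Python; excluded by Pre_solve
  | some c => if c ≠ 'B' then "NO" else solveLoop s.toList 0 0

-- ===== PORT B =====
-- normalization: "A" if c == "A" else "B"
def normChar (c : Char) : Char := if c = 'A' then 'A' else 'B'

-- t.replace("AB", ""): left-to-right removal of non-overlapping "AB" occurrences
def repAB : List Char → List Char
  | [] => []
  | [c] => [c]
  | a :: b :: rest => if a = 'A' ∧ b = 'B' then repAB rest else a :: repAB (b :: rest)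

-- '"AB" in t': the two-char substring test = an adjacent 'A',''B' pair
def hasAB : List Char → Bool
  | [] => false
  | [_] => false
  | a :: b :: rest => (a = 'A' && b = 'B') || hasAB (b :: rest)

-- termination of the while loop: each replace strictly shortens the string
theorem repAB_length_le : ∀ (l : List Char), (repAB l).length ≤ l.length := by
  intro l
  induction l using repAB.induct with
  | case1 => simp [repAB]
  | case2 c => simp [repAB]
  | case3 a b rest h ih => simp only [repAB, if_pos h]; simp at ih ⊢; omega
  | case4 a b rest h ih => simp only [repAB, if_neg h]; simp at ih ⊢; omega

theorem repAB_length_lt : ∀ (l : List Char), hasAB l = true → (repAB l).length < l.length := by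
  intro l
  induction l using repAB.induct with
  | case1 => simp [hasAB]
  | case2 c => simp [hasAB]
  | case3 a b rest h ih =>
      intro _
      simp only [repAB, if_pos h]
      have hle := repAB_length_le rest
      simp; omega
  | case4 a b rest h ih =>
      intro hh
      simp only [hasAB, Bool.or_eq_true, Bool.and_eq_true, decide_eq_true_eq] at hh
      rcases hh with ⟨h1, h2⟩ | hh
      · exact absurd ⟨h1, h2⟩ h
      · simp only [repAB, if_neg h, List.length_cons]
        have := ih hh
        simp only [List.length_cons] at this ⊢
        omega

-- while "AB" in t: t = t.replace("AB", "")
def reduceLoop (l : List Char) : List Char :=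
  if h : hasAB l = true then reduceLoop (repAB l) else l
  termination_by l.length
  decreasing_by exact repAB_length_lt l h

def solve_alt (s : String) : String :=
  match PySem.Str.pyGet? s (-1) with
  | none => "NO"   -- s[-1] raises IndexError in Python; excluded by Pre_solve
  | some c =>
      if c ≠ 'B' then "NO"
      else
        let t := reduceLoop (s.toList.map normChar)
        if t.contains 'B' then "NO" else "YES"

-- ===== PRECONDITION & SPEC =====
-- Pre_ excludes only the empty string, on which both A and B raise IndexError at s[-1].
def Pre_solve (s : String) : Prop := s ≠ ""
instance (s : String) : Decidable (Pre_solve s) := by unfold Pre_solve; infer_instance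
def pvWitness_solve : String := "AB"

def Spec_solve (s : String) (out : String) : Prop := out = solve_alt s
instance (s : String) (out : String) : Decidable (Spec_solve s out) := by unfold Spec_solve; infer_instance

-- ===== CLAIM (what is proved, stated in full; the proofs are below) =====
def Claim_equal_solve : Prop := ∀ (s : String), Dom_solve s → Pre_solve s → Spec_solve s (solve s)

-- ===== LEMMAS AND PROOFS =====

-- the prefix-balance list (+1 for 'A', -1 otherwise); both programs are characterised by it
def prefixBal (chars : List Char) (bal : Int) : List Int :=
  match chars with
  | [] => []
  | c :: rest =>
      let bal' := bal + (if c = 'A' then 1 else -1)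
      bal' :: prefixBal rest bal'

theorem solveLoop_yes_iff (chars : List Char) : ∀ (A B : Int), A - B ≥ 0 →
    (solveLoop chars A B = if ∀ x ∈ prefixBal chars (A - B), 0 ≤ x then "YES" else "NO") := by
  induction chars with
  | nil => intro A B _; simp [solveLoop, prefixBal]
  | cons c rest ih =>
      intro A B hAB
      by_cases hc : c = 'A'
      · rw [show solveLoop (c :: rest) A B = solveLoop rest (A + 1) B by
            simp [solveLoop, hc]]
        rw [ih (A + 1) B (by omega)]
        simp only [prefixBal, if_pos hc, List.forall_mem_cons,
          show A - B + 1 = A + 1 - B from by omega]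
        by_cases hall : ∀ x ∈ prefixBal rest (A + 1 - B), 0 ≤ x
        · simp [show B ≤ A + 1 from by omega]
        · simp [hall]
      · rw [show solveLoop (c :: rest) A B =
            (if B + 1 > A then "NO" else solveLoop rest A (B + 1)) by
            simp [solveLoop, hc]]
        simp only [prefixBal, if_neg hc, List.forall_mem_cons,
          show A - B + -1 = A - (B + 1) from by omega]
        by_cases hb : B + 1 > A
        · rw [if_pos hb, if_neg]
          rintro ⟨h1, -⟩
          omega
        · rw [if_neg hb, ih A (B + 1) (by omega)]
          by_cases hall : ∀ x ∈ prefixBal rest (A - (B + 1)), 0 ≤ x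
          · simp [show B < A from by omega]
          · simp [hall]

-- normalization does not change balances (only the test c = 'A' matters)
theorem prefixBal_map_norm (chars : List Char) : ∀ (b : Int),
    prefixBal (chars.map normChar) b = prefixBal chars b := by
  induction chars with
  | nil => intro b; simp [prefixBal]
  | cons c rest ih =>
      intro b
      by_cases hc : c = 'A'
      · simp [prefixBal, normChar, hc, ih]
      · simp [prefixBal, normChar, hc, ih]

-- deleting "AB" pairs preserves nonnegativity of all prefix balances (base ≥ 0)
theorem repAB_nonneg_iff (l : List Char) : ∀ (b : Int), 0 ≤ b →
    ((∀ x ∈ prefixBal (repAB l) b, 0 ≤ x) ↔ (∀ x ∈ prefixBal l b, 0 ≤ x)) := by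
  induction l using repAB.induct with
  | case1 => intro b _; simp [repAB]
  | case2 c => intro b _; simp [repAB]
  | case3 a b' rest h ih =>
      intro b hb
      obtain ⟨ha, hb'⟩ := h
      simp only [repAB, if_pos (And.intro ha hb')]
      rw [ih b hb]
      subst ha hb'
      have e1 : prefixBal ('A' :: 'B' :: rest) b
          = (b + 1) :: (b + 1 + -1) :: prefixBal rest (b + 1 + -1) := rfl
      rw [e1, show b + 1 + -1 = b from by omega]
      simp only [List.forall_mem_cons]
      constructor
      · intro h'; exact ⟨by omega, by omega, h'⟩
      · rintro ⟨-, -, h'⟩; exact h'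
  | case4 a b' rest h ih =>
      intro b hb
      simp only [repAB, if_neg h]
      rw [show prefixBal (a :: repAB (b' :: rest)) b =
            (b + (if a = 'A' then 1 else -1)) ::
              prefixBal (repAB (b' :: rest)) (b + (if a = 'A' then 1 else -1)) from rfl,
          show prefixBal (a :: b' :: rest) b =
            (b + (if a = 'A' then 1 else -1)) ::
              prefixBal (b' :: rest) (b + (if a = 'A' then 1 else -1)) from rfl]
      simp only [List.forall_mem_cons]
      by_cases hnn : 0 ≤ b + (if a = 'A' then 1 else -1)
      · rw [ih _ hnn]
      · constructor
        · rintro ⟨h1, -⟩; exact absurd h1 hnn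
        · rintro ⟨h1, -⟩; exact absurd h1 hnn

-- a normalized, irreducible string containing 'B' starts with 'B'
theorem irreducible_head (l : List Char) (hnorm : ∀ c ∈ l, c = 'A' ∨ c = 'B')
    (hab : hasAB l = false) (hB : 'B' ∈ l) : l.head? = some 'B' := by
  induction l with
  | nil => simp at hB
  | cons c rest ih =>
      rcases hnorm c (by simp) with hc | hc
      · subst hc
        cases rest with
        | nil => exact absurd hB (by decide)
        | cons d rest' =>
            simp only [hasAB, Bool.or_eq_false_iff, Bool.and_eq_false_iff] at hab
            obtain ⟨h1, h2⟩ := hab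
            have hBrest : 'B' ∈ d :: rest' := by
              rcases List.mem_cons.mp hB with h | h
              · exact absurd h.symm (by decide)
              · exact h
            have := ih (fun x hx => hnorm x (List.mem_cons_of_mem _ hx)) h2 hBrest
            simp only [List.head?] at this
            have hd : d = 'B' := by injection this
            rcases h1 with h1 | h1
            · simp at h1
            · simp [hd] at h1
      · subst hc; rfl

-- an all-'A' list has all prefix balances above the base
theorem prefixBal_allA (l : List Char) (hA : ∀ c ∈ l, c = 'A') : ∀ (b : Int),
    ∀ x ∈ prefixBal l b, b ≤ x := by
  induction l with
  | nil => intro b x hx; simp [prefixBal] at hx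
  | cons c rest ih =>
      intro b x hx
      have hc := hA c (by simp)
      simp only [prefixBal, if_pos hc, List.mem_cons] at hx
      rcases hx with h | h
      · omega
      · have := ih (fun y hy => hA y (List.mem_cons_of_mem _ hy)) (b + 1) x (by simpa [hc] using h)
        omega

-- irreducible case: 'B'-freeness coincides with nonnegativity of the balances
theorem irreducible_nonneg_iff (l : List Char) (hnorm : ∀ c ∈ l, c = 'A' ∨ c = 'B')
    (hab : hasAB l = false) :
    (l.contains 'B' = false) ↔ (∀ x ∈ prefixBal l 0, 0 ≤ x) := by
  constructor
  · intro hfree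
    have hnB : 'B' ∉ l := by simpa using hfree
    have hA : ∀ c ∈ l, c = 'A' := by
      intro c hc
      rcases hnorm c hc with h | h
      · exact h
      · exact absurd (h ▸ hc) hnB
    intro x hx
    have := prefixBal_allA l hA 0 x hx
    omega
  · intro hnn
    by_contra hcon
    have hB : 'B' ∈ l := by
      have ht : l.contains 'B' = true := by
        cases hcb : l.contains 'B' with
        | false => exact absurd hcb hcon
        | true => rfl
      simpa using ht
    have hh := irreducible_head l hnorm hab hB
    cases l with
    | nil => simp at hB
    | cons c rest =>
        have hc : c = 'B' := by simpa using hh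
        have h2 := hnn (0 + (if c = 'A' then 1 else -1)) (by
          rw [show prefixBal (c :: rest) 0
                = (0 + (if c = 'A' then 1 else -1))
                    :: prefixBal rest (0 + (if c = 'A' then 1 else -1)) from rfl]
          exact List.mem_cons_self ..)
        rw [hc, if_neg (show ¬ ('B' : Char) = 'A' by decide)] at h2
        omega

-- repAB only keeps characters of its input
theorem repAB_subset (l : List Char) : ∀ c ∈ repAB l, c ∈ l := by
  induction l using repAB.induct with
  | case1 => simp [repAB]
  | case2 c => simp [repAB]
  | case3 a b rest h ih =>
      simp only [repAB, if_pos h]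
      intro c hc
      exact List.mem_cons_of_mem _ (List.mem_cons_of_mem _ (ih c hc))
  | case4 a b rest h ih =>
      simp only [repAB, if_neg h]
      intro c hc
      rcases List.mem_cons.mp hc with h' | h'
      · simp [h']
      · exact List.mem_cons_of_mem _ (ih c h')

-- the reduction loop preserves the balance criterion, and ends irreducible
theorem reduceLoop_nonneg_iff (l : List Char) (hnorm : ∀ c ∈ l, c = 'A' ∨ c = 'B') :
    ((reduceLoop l).contains 'B' = false) ↔ (∀ x ∈ prefixBal l 0, 0 ≤ x) := by
  induction l using reduceLoop.induct with
  | case1 l h ih =>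
      rw [show reduceLoop l = reduceLoop (repAB l) by rw [reduceLoop, dif_pos h]]
      have hnorm' : ∀ c ∈ repAB l, c = 'A' ∨ c = 'B' := fun c hc => hnorm c (repAB_subset l c hc)
      rw [ih hnorm', repAB_nonneg_iff l 0 (by omega)]
  | case2 l h =>
      rw [show reduceLoop l = l by rw [reduceLoop, dif_neg h]]
      exact irreducible_nonneg_iff l hnorm (by simpa using h)

-- ===== VERDICT (by name: the statement is the Claim_ definition above) =====
theorem solve_spec : Claim_equal_solve := by
  intro s _ hpre
  unfold Spec_solve solve solve_alt
  cases hget : PySem.Str.pyGet? s (-1) with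
  | none => rfl
  | some c =>
      by_cases hc : c = 'B'
      · simp only [hc, ne_eq, not_true_eq_false, if_false]
        have hnorm : ∀ d ∈ s.toList.map normChar, d = 'A' ∨ d = 'B' := by
          intro d hd
          rcases List.mem_map.mp hd with ⟨e, -, he⟩
          by_cases h : e = 'A'
          · left; rw [← he]; simp [normChar, h]
          · right; rw [← he]; simp [normChar, h]
        have hred := reduceLoop_nonneg_iff (s.toList.map normChar) hnorm
        rw [prefixBal_map_norm] at hred
        have hloop := solveLoop_yes_iff s.toList 0 0 (by omega)
        rw [show (0 : Int) - 0 = 0 from by omega] at hloop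
        rw [hloop]
        by_cases hcont : (reduceLoop (s.toList.map normChar)).contains 'B' = false
        · rw [if_pos (hred.mp hcont)]
          have hmem : 'B' ∉ reduceLoop (List.map normChar s.toList) := by simpa using hcont
          simp [hmem]
        · rw [if_neg (fun h => hcont (hred.mpr h))]
          simp only [Bool.not_eq_false] at hcont
          have hmem : 'B' ∈ reduceLoop (List.map normChar s.toList) := by simpa using hcont
          simp [hmem]
      · simp [hc]
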